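-- pv_equiv track=rewrite | github.com/goranikin/snu_retrieval | src/data_augmentation/make_triplet/make_triplet.py | get_clean_paragraph_indices
-- ===== SOURCE A (Python) =====
-- from typing import List, Tuple
--
-- def get_clean_full_paper(item: dict) -> str:
--     return item["full_paper"]
--
-- def get_clean_paragraph_indices(item: dict) -> List[Tuple[int, int]]:
--     text = get_clean_full_paper(item)
--     paragraph_indices = []
--     paragraph_start = 0
--     paragraph_end = 0
--     while paragraph_start < len(text):
--         paragraph_end = text.find("\n\n", paragraph_start)
--         if paragraph_end == -1:
--             paragraph_end = len(text)
--         paragraph_indices.append((paragraph_start, paragraph_end))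
--         paragraph_start = paragraph_end + 2
--     return paragraph_indices
-- ===== SOURCE B (Python) =====
-- def get_clean_paragraph_indices(item):
--     text = item["full_paper"]
--     parts = text.split("\n\n")
--     if parts and parts[-1] == "":
--         parts.pop()
--     indices = []
--     start = 0
--     for part in parts:
--         indices.append((start, start + len(part)))
--         start += len(part) + 2
--     return indices
-- ===== Notes on version B (the rewrite author's own statement) =====
-- stated objective: idiomatic
-- what changed: Replaces A's manual repeated text.find('\n\n', start) index-jumping while-loop with a staged split-then-reconstruct approach: tokenize with text.split('\n\n'), drop the one trailing empty part, then fold over the parts list rebuilding (start, start+len(part)) offsets.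
import Mathlib
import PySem

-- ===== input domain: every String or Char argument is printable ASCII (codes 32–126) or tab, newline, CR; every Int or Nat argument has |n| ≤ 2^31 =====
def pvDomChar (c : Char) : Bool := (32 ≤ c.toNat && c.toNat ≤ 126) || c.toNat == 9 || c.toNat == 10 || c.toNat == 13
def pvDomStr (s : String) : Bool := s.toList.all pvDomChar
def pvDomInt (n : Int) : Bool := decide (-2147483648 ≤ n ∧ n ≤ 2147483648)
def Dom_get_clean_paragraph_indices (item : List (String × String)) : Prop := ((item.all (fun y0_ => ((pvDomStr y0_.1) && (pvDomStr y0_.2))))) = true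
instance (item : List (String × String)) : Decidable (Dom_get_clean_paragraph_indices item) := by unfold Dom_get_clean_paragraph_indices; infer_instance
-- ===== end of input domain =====

-- B replaces A's repeated text.find("\n\n", start) while-loop by split("\n\n") followed by an
-- offset-reconstructing fold over the parts; equal on every item containing the "full_paper" key
-- (both A and B raise KeyError otherwise).

-- ===== PORT A =====
-- helper: the two lines 'end = text.find("\n\n", start); if end == -1: end = len(text)'
def aEndIdx (cs : List Char) (s : Nat) : Nat :=
  if PySem.Chars.findFrom cs ['\n', '\n'] (s : Int) = -1 then cs.length
  else (PySem.Chars.findFrom cs ['\n', '\n'] (s : Int)).toNat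

-- used by aLoop's termination: the computed end never lies left of start
theorem aEndIdx_ge (cs : List Char) (s : Nat) (hs : s ≤ cs.length) : s ≤ aEndIdx cs s := by
  unfold aEndIdx
  by_cases h : PySem.Chars.findFrom cs ['\n', '\n'] (s : Int) = -1
  · rw [if_pos h]; exact hs
  · rw [if_neg h]
    have := (PySem.Chars.findFrom_natCast_spec cs ['\n', '\n'] s hs h).1
    omega

-- the 'while paragraph_start < len(text)' loop of A (state: paragraph_start; ranges built by cons)
def aLoop (cs : List Char) (s : Nat) : List (Int × Int) :=
  if h : s < cs.length then
    ((s : Int), (aEndIdx cs s : Int)) :: aLoop cs (aEndIdx cs s + 2)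
  else []
termination_by cs.length - s
decreasing_by
  have := aEndIdx_ge cs s (le_of_lt h)
  omega

def get_clean_paragraph_indices (item : List (String × String)) : List (Int × Int) :=
  match PySem.Dict.get? (PySem.Dict.mk item) "full_paper" with
  | none => []          -- KeyError in Python; excluded by Pre_
  | some t => aLoop t.toList 0

-- ===== PORT B =====
-- B's fold over the parts list: state (indices, start); one (start, start+len) pair per part
def bRanges (parts : List (List Char)) (start : Nat) : List (Int × Int) :=
  match parts with
  | [] => []
  | p :: rest => ((start : Int), ((start + p.length : Nat) : Int)) :: bRanges rest (start + p.length + 2)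

-- B's 'if parts and parts[-1] == "": parts.pop()'
def bDropTrail (parts : List (List Char)) : List (List Char) :=
  if parts ≠ [] ∧ parts.getLast? = some [] then parts.dropLast else parts

def get_clean_paragraph_indices_alt (item : List (String × String)) : List (Int × Int) :=
  match PySem.Dict.get? (PySem.Dict.mk item) "full_paper" with
  | none => []          -- KeyError in Python; excluded by Pre_
  | some t => bRanges (bDropTrail (PySem.Chars.splitOn t.toList ['\n', '\n'])) 0

-- ===== PRECONDITION & SPEC =====
-- Pre_ excludes exactly the dicts without the "full_paper" key, where A (and B) raises KeyError.
def Pre_get_clean_paragraph_indices (item : List (String × String)) : Prop :=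
  (PySem.Dict.get? (PySem.Dict.mk item) "full_paper").isSome = true
instance (item : List (String × String)) : Decidable (Pre_get_clean_paragraph_indices item) := by unfold Pre_get_clean_paragraph_indices; infer_instance

def pvWitness_get_clean_paragraph_indices : (List (String × String)) := [("full_paper", "ab\n\ncd")]

def Spec_get_clean_paragraph_indices (item : List (String × String)) (out : List (Int × Int)) : Prop := out = get_clean_paragraph_indices_alt item
instance (item : List (String × String)) (out : List (Int × Int)) : Decidable (Spec_get_clean_paragraph_indices item out) := by unfold Spec_get_clean_paragraph_indices; infer_instance

-- ===== CLAIM (what is proved, stated in full; the proofs are below) =====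
def Claim_equal_get_clean_paragraph_indices : Prop := ∀ (item : List (String × String)), Dom_get_clean_paragraph_indices item → Pre_get_clean_paragraph_indices item → Spec_get_clean_paragraph_indices item (get_clean_paragraph_indices item)

-- ===== LEMMAS AND PROOFS =====

-- an occurrence of "\n\n" at position k leaves at least two characters from k on
theorem occ_len (l : List Char) (k : Nat) (h : ['\n', '\n'] <+: l.drop k) : k + 2 ≤ l.length := by
  have hlen := h.length_le
  simp only [List.length_drop, List.length_cons, List.length_nil] at hlen
  by_cases hk : k ≤ l.length
  · omega
  · rw [List.drop_eq_nil_of_le (by omega)] at h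
    rw [List.prefix_nil] at h
    exact absurd h (by simp)

-- find points at the first occurrence
theorem find_eq_first (t : List Char) (k : Nat)
    (hk : ['\n', '\n'] <+: t.drop k) (hmin : ∀ m, m < k → ¬ ['\n', '\n'] <+: t.drop m) :
    PySem.Chars.find t ['\n', '\n'] = (k : Int) := by
  have hinf : ['\n', '\n'] <:+: t := hk.isInfix.trans (List.drop_suffix k t).isInfix
  have hnn : 0 ≤ PySem.Chars.find t ['\n', '\n'] := (PySem.Chars.find_nonneg_iff t _).2 hinf
  obtain ⟨hocc, hfirst⟩ := PySem.Chars.find_spec hnn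
  have h1 : ¬ (PySem.Chars.find t ['\n', '\n']).toNat < k := fun h => hmin _ h hocc
  have h2 : ¬ k < (PySem.Chars.find t ['\n', '\n']).toNat := fun h => hfirst k h hk
  omega

-- no occurrence anywhere → find = -1
theorem find_eq_neg_one (t : List Char)
    (h : ∀ j, ¬ ['\n', '\n'] <+: t.drop j) : PySem.Chars.find t ['\n', '\n'] = -1 := by
  rw [PySem.Chars.find_eq_neg_one_iff]
  intro hinf
  obtain ⟨j, hj⟩ := (PySem.Chars.exists_prefix_drop_iff_isIn ['\n', '\n'] t).2
    ((PySem.Chars.isIn_iff_infix ['\n', '\n'] t).2 hinf)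
  exact h j hj

-- specification of split on "\n\n": head part before the first separator, then the split of the rest
def spSpec (l : List Char) : List Char × List (List Char) :=
  if h : PySem.Chars.find l ['\n', '\n'] = -1 then (l, [])
  else
    let k := (PySem.Chars.find l ['\n', '\n']).toNat
    (l.take k, (spSpec (l.drop (k + 2))).1 :: (spSpec (l.drop (k + 2))).2)
termination_by l.length
decreasing_by
  have hnn : 0 ≤ PySem.Chars.find l ['\n', '\n'] := by
    have := PySem.Chars.neg_one_le_find l ['\n', '\n']
    omega
  have hocc := (PySem.Chars.find_spec hnn).1
  have := occ_len l (PySem.Chars.find l ['\n', '\n']).toNat hocc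
  simp only [List.length_drop]
  omega

-- spSpec on the empty list
theorem spSpec_nil : spSpec [] = ([], []) := by
  rw [spSpec]
  rw [dif_pos (find_eq_neg_one [] (by intro j h; rw [List.drop_nil, List.prefix_nil] at h; simp at h))]

-- spSpec when the separator starts right at the head
theorem spSpec_sep (l : List Char) (h : ['\n', '\n'] <+: l) :
    spSpec l = ([], (spSpec (l.drop 2)).1 :: (spSpec (l.drop 2)).2) := by
  have hfind : PySem.Chars.find l ['\n', '\n'] = (0 : Int) := by
    apply find_eq_first l 0 (by simpa using h)
    intro m hm; omega
  rw [spSpec, dif_neg (by rw [hfind]; decide)]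
  simp [hfind]

-- spSpec when the separator does not start at the head
theorem spSpec_cons_no (c : Char) (rest : List Char) (h : ¬ ['\n', '\n'] <+: (c :: rest)) :
    spSpec (c :: rest) = (c :: (spSpec rest).1, (spSpec rest).2) := by
  by_cases hr : PySem.Chars.find rest ['\n', '\n'] = -1
  · have hl : PySem.Chars.find (c :: rest) ['\n', '\n'] = -1 := by
      apply find_eq_neg_one
      intro j hj
      cases j with
      | zero => exact h (by simpa using hj)
      | succ m =>
        rw [List.drop_succ_cons] at hj
        rw [PySem.Chars.find_eq_neg_one_iff] at hr
        exact hr (hj.isInfix.trans (List.drop_suffix m rest).isInfix)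
    rw [spSpec, dif_pos hl, spSpec, dif_pos hr]
  · have hnn : 0 ≤ PySem.Chars.find rest ['\n', '\n'] := by
      have := PySem.Chars.neg_one_le_find rest ['\n', '\n']; omega
    obtain ⟨hocc, hfirst⟩ := PySem.Chars.find_spec (sub := ['\n', '\n']) hnn
    set k := (PySem.Chars.find rest ['\n', '\n']).toNat with hk
    have hfind : PySem.Chars.find (c :: rest) ['\n', '\n'] = ((k + 1 : Nat) : Int) := by
      apply find_eq_first
      · rw [List.drop_succ_cons]; exact hocc
      · intro m hm
        cases m with
        | zero => exact fun hj => h (by simpa using hj)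
        | succ m' =>
          rw [List.drop_succ_cons]
          exact hfirst m' (by omega)
    have hkr : PySem.Chars.find rest ['\n', '\n'] = (k : Int) := by omega
    have h1 : ¬ PySem.Chars.find (c :: rest) ['\n', '\n'] = -1 := by rw [hfind]; omega
    conv_lhs => rw [spSpec]
    rw [dif_neg h1]
    conv_rhs => rw [spSpec]
    rw [dif_neg hr]
    simp only [hfind, hkr, Int.toNat_natCast, List.take_succ_cons]
    rw [show k + 1 + 2 = (k + 2) + 1 by omega, List.drop_succ_cons]

-- the fuel-based splitOn.go computes spSpec (invariant of the accumulator loop)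
theorem go_spec (fuel : Nat) (l cur : List Char) (acc : List (List Char))
    (hf : l.length < fuel) :
    PySem.Chars.splitOn.go ['\n', '\n'] fuel l cur acc
      = acc.reverse ++ (cur.reverse ++ (spSpec l).1) :: (spSpec l).2 := by
  induction fuel generalizing l cur acc with
  | zero => omega
  | succ f ih =>
    cases l with
    | nil =>
      rw [PySem.Chars.splitOn.go, spSpec_nil]
      simp
      omega
    | cons c rest =>
      rw [PySem.Chars.splitOn.go]
      by_cases hp : (['\n', '\n'] : List Char).isPrefixOf (c :: rest) = true
      · rw [if_pos hp]
        have hpre : ['\n', '\n'] <+: (c :: rest) := List.isPrefixOf_iff_prefix.1 hp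
        have hlen := hpre.length_le
        simp only [List.length_cons, List.length_nil] at hlen
        rw [ih _ _ _ (by simp only [List.length_drop, List.length_cons] at hf ⊢; omega),
          spSpec_sep _ hpre]
        simp
      · rw [if_neg hp]
        have hnpre : ¬ ['\n', '\n'] <+: (c :: rest) :=
          fun hh => hp (List.isPrefixOf_iff_prefix.2 hh)
        rw [ih _ _ _ (by simp at hf ⊢; omega), spSpec_cons_no c rest hnpre]
        simp

-- splitOn = spSpec
theorem splitOn_eq_spSpec (l : List Char) :
    PySem.Chars.splitOn l ['\n', '\n'] = (spSpec l).1 :: (spSpec l).2 := by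
  unfold PySem.Chars.splitOn
  rw [go_spec (l.length + 1) l [] [] (by omega)]
  simp

-- spSpec's parts list is nonempty in the recursive position, so bDropTrail distributes over the cons
theorem bDropTrail_cons (p : List Char) (q : List Char) (ps : List (List Char)) :
    bDropTrail (p :: q :: ps) = p :: bDropTrail (q :: ps) := by
  unfold bDropTrail
  by_cases h : (q :: ps).getLast? = some ([] : List Char)
  · rw [if_pos ⟨by simp, by simp [List.getLast?_cons_cons] at h ⊢; exact h⟩,
      if_pos ⟨by simp, h⟩]
    simp
  · rw [if_neg (by simp [List.getLast?_cons_cons] at h ⊢; exact h),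
      if_neg (by simp at h ⊢; exact h)]

-- MAIN INVARIANT: B's reconstruction over the split of the suffix cs.drop s equals A's loop from s
-- aEndIdx via find on the suffix
theorem aEndIdx_of_none (cs : List Char) (s : Nat) (hs : s ≤ cs.length)
    (hf : PySem.Chars.find (cs.drop s) ['\n', '\n'] = -1) : aEndIdx cs s = cs.length := by
  unfold aEndIdx
  rw [PySem.Chars.findFrom_natCast cs ['\n', '\n'] s hs, hf]
  simp

theorem aEndIdx_of_some (cs : List Char) (s k : Nat) (hs : s ≤ cs.length)
    (hf : PySem.Chars.find (cs.drop s) ['\n', '\n'] = (k : Int)) : aEndIdx cs s = s + k := by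
  unfold aEndIdx
  rw [PySem.Chars.findFrom_natCast cs ['\n', '\n'] s hs, hf]
  rw [if_neg (by omega)]
  rw [if_neg (by omega)]
  omega

theorem main_inv (cs : List Char) (s : Nat) (hs : s ≤ cs.length) :
    bRanges (bDropTrail ((spSpec (cs.drop s)).1 :: (spSpec (cs.drop s)).2)) s = aLoop cs s := by
  by_cases hf : PySem.Chars.find (cs.drop s) ['\n', '\n'] = -1
  · rw [spSpec, dif_pos hf]
    by_cases hsl : s < cs.length
    · have hne : cs.drop s ≠ [] := by
        intro h
        have := congrArg List.length h
        simp only [List.length_drop, List.length_nil] at this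
        omega
      rw [bDropTrail, if_neg (by
        intro ⟨_, h2⟩
        simp only [List.getLast?_singleton, Option.some.injEq] at h2
        exact hne h2)]
      rw [bRanges, bRanges]
      rw [aLoop, dif_pos hsl, aEndIdx_of_none cs s hs hf]
      rw [aLoop, dif_neg (by omega)]
      simp only [List.length_drop]
      congr 2
      omega
    · have hnil : cs.drop s = [] := List.drop_eq_nil_of_le (by omega)
      rw [hnil, bDropTrail, if_pos ⟨by simp, by simp⟩]
      show bRanges [] s = aLoop cs s
      rw [aLoop, dif_neg hsl]
      rfl
  · have hnn : 0 ≤ PySem.Chars.find (cs.drop s) ['\n', '\n'] := by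
      have := PySem.Chars.neg_one_le_find (cs.drop s) ['\n', '\n']; omega
    set k := (PySem.Chars.find (cs.drop s) ['\n', '\n']).toNat with hk
    have hkr : PySem.Chars.find (cs.drop s) ['\n', '\n'] = (k : Int) := by omega
    have hocc := (PySem.Chars.find_spec (sub := ['\n', '\n']) hnn).1
    have hkl : k + 2 ≤ (cs.drop s).length := occ_len _ _ hocc
    simp only [List.length_drop] at hkl
    rw [spSpec, dif_neg hf]
    simp only [← hk]
    rw [bDropTrail_cons, bRanges]
    have htk : ((cs.drop s).take k).length = k := by
      rw [List.length_take]
      simp only [List.length_drop]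
      omega
    have hdd : (cs.drop s).drop (k + 2) = cs.drop (s + (k + 2)) := by
      rw [List.drop_drop]
    rw [htk, hdd]
    have ih := main_inv cs (s + (k + 2)) (by omega)
    rw [show s + k + 2 = s + (k + 2) by omega, ih]
    conv_rhs => rw [aLoop]
    rw [dif_pos (show s < cs.length by omega), aEndIdx_of_some cs s k hs hkr,
      show s + k + 2 = s + (k + 2) by omega]
termination_by cs.length - s
decreasing_by
  simp only [← hk]
  simp only [List.length_drop] at hkl
  omega

-- ===== VERDICT (by name: the statement is the Claim_ definition above) =====
theorem get_clean_paragraph_indices_spec : Claim_equal_get_clean_paragraph_indices := by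
  intro item _dom _pre
  unfold Spec_get_clean_paragraph_indices
  unfold get_clean_paragraph_indices get_clean_paragraph_indices_alt
  cases h : PySem.Dict.get? (PySem.Dict.mk item) "full_paper" with
  | none => rfl
  | some t =>
    simp only
    rw [splitOn_eq_spSpec]
    have := main_inv t.toList 0 (Nat.zero_le _)
    simpa using this.symm
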